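-- pv_equiv track=rewrite | github.com/gl0bsec/get_gdelt_data | report_generation/country_code_utils.py | identify_african_countries
-- ===== SOURCE A (Python) =====
-- def identify_african_countries(fips_dict):
--     """
--     Identify African countries from FIPS dictionary based on country names.
--
--     Args:
--         fips_dict (dict): FIPS country code dictionary
--
--     Returns:
--         list: List of FIPS codes for African countries
--     """
--     # Keywords that indicate African countries
--     african_keywords = [
--         'algeria', 'angola', 'benin', 'botswana', 'burkina', 'burundi', 'cameroon',
--         'cape verde', 'central african', 'chad', 'comoros', 'congo', 'djibouti',
--         'egypt', 'equatorial guinea', 'eritrea', 'ethiopia', 'gabon', 'gambia',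
--         'ghana', 'guinea', 'ivory coast', 'kenya', 'lesotho', 'liberia', 'libya',
--         'madagascar', 'malawi', 'mali', 'mauritania', 'mauritius', 'morocco',
--         'mozambique', 'namibia', 'niger', 'nigeria', 'rwanda', 'sao tome',
--         'senegal', 'seychelles', 'sierra leone', 'somalia', 'south africa',
--         'sudan', 'swaziland', 'tanzania', 'togo', 'tunisia', 'uganda', 'zambia',
--         'zimbabwe'
--     ]
--
--     african_codes = []
--
--     for code, name in fips_dict.items():
--         name_lower = name.lower()
--         # Check if any African keyword appears in the country name
--         if any(keyword in name_lower for keyword in african_keywords):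
--             african_codes.append(code)
--
--     return sorted(african_codes)
-- ===== SOURCE B (Python) =====
-- def identify_african_countries(fips_dict):
--     """African FIPS codes via a first-letter index of the keywords and an explicit
--     per-position prefix scan of each name (multi-pattern matching), instead of a
--     per-keyword substring test."""
--     african_keywords = [
--         'algeria', 'angola', 'benin', 'botswana', 'burkina', 'burundi', 'cameroon',
--         'cape verde', 'central african', 'chad', 'comoros', 'congo', 'djibouti',
--         'egypt', 'equatorial guinea', 'eritrea', 'ethiopia', 'gabon', 'gambia',
--         'ghana', 'guinea', 'ivory coast', 'kenya', 'lesotho', 'liberia', 'libya',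
--         'madagascar', 'malawi', 'mali', 'mauritania', 'mauritius', 'morocco',
--         'mozambique', 'namibia', 'niger', 'nigeria', 'rwanda', 'sao tome',
--         'senegal', 'seychelles', 'sierra leone', 'somalia', 'south africa',
--         'sudan', 'swaziland', 'tanzania', 'togo', 'tunisia', 'uganda', 'zambia',
--         'zimbabwe'
--     ]
--     by_first = {}
--     for kw in african_keywords:
--         ch = kw[0]
--         by_first[ch] = by_first.get(ch, []) + [kw]
--     codes = []
--     for code, name in fips_dict.items():
--         low = name.lower()
--         if _matches(low, by_first):
--             codes.append(code)
--     return sorted(codes)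
--
--
-- def _matches(low, by_first):
--     """Scan the name left to right; at each position try only the keywords that
--     start with that character, comparing them as a slice-prefix."""
--     for i in range(len(low)):
--         for kw in by_first.get(low[i], []):
--             if low[i:i + len(kw)] == kw:
--                 return True
--     return False
-- ===== Notes on version B (the rewrite author's own statement) =====
-- stated objective: alternative
-- what changed: Replaces the per-name any()-over-50-keywords substring test by a multi-pattern matcher: a dict bucketing keywords by first letter is built once, then each lowercased name is scanned position by position, testing only the keywords bucketed under the current character as slice-prefixes; matching codes are collected and sorted as before.
import Mathlib
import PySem

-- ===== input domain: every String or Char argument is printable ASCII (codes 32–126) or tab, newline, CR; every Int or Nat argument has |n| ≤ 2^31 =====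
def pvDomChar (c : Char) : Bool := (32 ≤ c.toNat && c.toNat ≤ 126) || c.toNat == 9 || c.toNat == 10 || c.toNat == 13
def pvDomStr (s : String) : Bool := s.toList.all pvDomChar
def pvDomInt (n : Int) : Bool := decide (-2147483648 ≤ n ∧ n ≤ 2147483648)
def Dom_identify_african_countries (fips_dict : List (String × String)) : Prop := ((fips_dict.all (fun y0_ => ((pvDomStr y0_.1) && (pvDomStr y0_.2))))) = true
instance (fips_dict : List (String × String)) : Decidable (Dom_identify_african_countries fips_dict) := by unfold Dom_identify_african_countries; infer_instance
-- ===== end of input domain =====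

-- B replaces the per-name any()-over-keywords substring test by a first-letter bucket index of the keywords plus an explicit per-position prefix scan of each name (alternative algorithm, similar cost).


-- the keyword list, verbatim from the Python source (shared literal, used by both ports)
def african_keywords : List String :=
  ["algeria", "angola", "benin", "botswana", "burkina", "burundi", "cameroon",
   "cape verde", "central african", "chad", "comoros", "congo", "djibouti",
   "egypt", "equatorial guinea", "eritrea", "ethiopia", "gabon", "gambia",
   "ghana", "guinea", "ivory coast", "kenya", "lesotho", "liberia", "libya",
   "madagascar", "malawi", "mali", "mauritania", "mauritius", "morocco",
   "mozambique", "namibia", "niger", "nigeria", "rwanda", "sao tome",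
   "senegal", "seychelles", "sierra leone", "somalia", "south africa",
   "sudan", "swaziland", "tanzania", "togo", "tunisia", "uganda", "zambia",
   "zimbabwe"]

-- ===== PORT A =====
def identify_african_countries (fips_dict : List (String × String)) : List String :=
  let african_codes :=
    (PySem.Dict.ofList fips_dict).items.foldl
      (fun acc p =>
        let name_lower := PySem.Str.lower p.2
        if african_keywords.any (fun keyword => PySem.Str.isIn keyword name_lower) then
          acc ++ [p.1]
        else acc) []
  PySem.List.sorted african_codes (fun x => x) false

-- ===== PORT B =====
-- by_first = {}; for kw in african_keywords: by_first[kw[0]] = by_first.get(kw[0], []) + [kw]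
def african_by_first : PySem.Dict Char (List String) :=
  african_keywords.foldl
    (fun d kw =>
      let ch := (PySem.Str.pyGet? kw 0).getD ' '   -- kw[0]; every keyword is nonempty, getD never fires
      d.insert ch (d.getD ch [] ++ [kw]))
    PySem.Dict.empty

-- _matches(low, by_first): for i in range(len(low)): for kw in by_first.get(low[i], []): if low[i:i+len(kw)] == kw: return True
def matchesAfrican (low : String) : Bool :=
  (PySem.List.pyRange 0 (PySem.Str.len low) 1).any fun i =>
    (african_by_first.getD ((PySem.Str.pyGet? low i).getD ' ') []).any fun kw =>
      PySem.Str.slice low (some i) (some (i + PySem.Str.len kw)) == kw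

def identify_african_countries_alt (fips_dict : List (String × String)) : List String :=
  let codes :=
    (PySem.Dict.ofList fips_dict).items.foldl
      (fun acc p =>
        if matchesAfrican (PySem.Str.lower p.2) then acc ++ [p.1] else acc) []
  PySem.List.sorted codes (fun x => x) false

-- ===== PRECONDITION & SPEC =====
def Spec_identify_african_countries (fips_dict : List (String × String)) (out : List String) : Prop := out = identify_african_countries_alt fips_dict
instance (fips_dict : List (String × String)) (out : List String) : Decidable (Spec_identify_african_countries fips_dict out) := by unfold Spec_identify_african_countries; infer_instance

-- ===== CLAIM (what is proved, stated in full; the proofs are below) =====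
def Claim_equal_identify_african_countries : Prop := ∀ (fips_dict : List (String × String)), Dom_identify_african_countries fips_dict → Spec_identify_african_countries fips_dict (identify_african_countries fips_dict)

-- ===== LEMMAS AND PROOFS =====

-- every list stored in the bucket dict consists of keywords only (the dict is a closed literal)
set_option maxRecDepth 4096 in
theorem byFirst_items_sub :
    african_by_first.items.all
      (fun p => p.2.all (fun kw => decide (kw ∈ african_keywords))) = true := by decide

-- every keyword is nonempty and is found in its own first-letter bucket
theorem keyword_in_own_bucket :
    african_keywords.all
      (fun kw => !(kw == "") &&
        (african_by_first.getD ((PySem.Str.pyGet? kw 0).getD ' ') []).any (fun k => k == kw)) = true := by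
  set_option maxRecDepth 4096 in decide

-- a getD result is the default or the value of some stored item
theorem getD_default_or_item {κ ν : Type} [BEq κ] [LawfulBEq κ] (d : PySem.Dict κ ν) (k : κ) (dflt : ν) :
    d.getD k dflt = dflt ∨ ∃ p ∈ d.items, d.getD k dflt = p.2 := by
  rw [PySem.Dict.getD_eq_get?_getD]
  cases h : d.get? k with
  | none => exact Or.inl rfl
  | some v => exact Or.inr ⟨(k, v), PySem.Dict.mem_items_of_get?_eq_some (h := h), rfl⟩

-- a keyword stored in any bucket is one of the 50 keywords
theorem bucket_sub (c : Char) (kw : String)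
    (h : kw ∈ african_by_first.getD c []) : kw ∈ african_keywords := by
  rcases getD_default_or_item african_by_first c [] with he | ⟨p, hp, hv⟩
  · rw [he] at h; cases h
  · rw [hv] at h
    have := byFirst_items_sub
    simp only [List.all_eq_true, decide_eq_true_eq] at this
    exact this p hp kw h

-- core: B's position scan finds a keyword iff A's substring test does
theorem matches_iff (low : String) :
    matchesAfrican low = african_keywords.any (fun keyword => PySem.Str.isIn keyword low) := by
  rw [Bool.eq_iff_iff]
  unfold matchesAfrican
  simp only [List.any_eq_true, PySem.List.mem_pyRange_one, beq_iff_eq]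
  constructor
  · rintro ⟨i, ⟨h0, hn⟩, kw, hkw, hsl⟩
    refine ⟨kw, bucket_sub _ _ hkw, ?_⟩
    rw [PySem.Str.isIn_iff_infix]
    -- recover the natural index
    obtain ⟨j, rfl⟩ : ∃ j : Nat, i = (j : Int) := ⟨i.toNat, (Int.toNat_of_nonneg h0).symm⟩
    have hsl' := congrArg String.toList hsl
    rw [PySem.Str.toList_slice] at hsl'
    simp only [PySem.Chars.slice_eq_listSlice, PySem.Str.len_eq] at hsl'
    rw [PySem.List.slice_natCast_add] at hsl'
    have hpre : kw.toList <+: low.toList.drop j := hsl' ▸ List.take_prefix _ _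
    exact hpre.isInfix.trans (List.drop_suffix j low.toList).isInfix
  · rintro ⟨kw, hkw, hin⟩
    rw [PySem.Str.isIn_iff_infix] at hin
    obtain ⟨s, t, heq⟩ := hin
    have hall := keyword_in_own_bucket
    simp only [List.all_eq_true, Bool.and_eq_true, Bool.not_eq_true', beq_eq_false_iff_ne,
      List.any_eq_true, beq_iff_eq] at hall
    obtain ⟨hne, hex⟩ := hall kw hkw
    have hkw' : kw ∈ african_by_first.getD ((PySem.Str.pyGet? kw 0).getD ' ') [] := by
      obtain ⟨k', hk', e⟩ := hex; subst e; exact hk'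
    have hkwnil : kw.toList ≠ [] := fun h => hne (String.toList_inj.mp (by rw [h]; rfl))
    have hlen : low.toList.length = s.length + kw.toList.length + t.length := by
      rw [← heq]; simp; omega
    have hj : s.length < low.toList.length := by
      have := List.length_pos_of_ne_nil hkwnil
      omega
    have hdrop : low.toList.drop s.length = kw.toList ++ t := by
      rw [← heq, List.append_assoc, List.drop_left]
    refine ⟨(s.length : Int), ⟨by positivity, ?_⟩, kw, ?_, ?_⟩
    · rw [PySem.Str.len_eq]; exact_mod_cast hj
    · -- the key char at position s.length is kw's first char
      have hget : PySem.Str.pyGet? low (s.length : Int) = kw.toList[0]? := by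
        calc PySem.Str.pyGet? low (s.length : Int) = low.toList[s.length]? :=
              PySem.Str.pyGet?_natCast low s.length
          _ = low.toList[s.length + 0]? := by norm_num
          _ = (low.toList.drop s.length)[0]? := (List.getElem?_drop).symm
          _ = kw.toList[0]? := by
              rw [hdrop, List.getElem?_append_left (List.length_pos_of_ne_nil hkwnil)]
      rw [hget]
      have hk0 : (PySem.Str.pyGet? kw 0).getD ' ' = kw.toList[0]?.getD ' ' := by
        rw [show (0 : Int) = ((0 : Nat) : Int) from rfl, PySem.Str.pyGet?_natCast]
      rw [← hk0]
      exact hkw'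
    · -- the slice at position s.length equals kw
      apply String.toList_inj.mp
      rw [PySem.Str.toList_slice]
      simp only [PySem.Chars.slice_eq_listSlice, PySem.Str.len_eq]
      rw [PySem.List.slice_natCast_add, hdrop, List.take_left]

-- ===== VERDICT (by name: the statement is the Claim_ definition above) =====
theorem identify_african_countries_spec : Claim_equal_identify_african_countries := by
  unfold Claim_equal_identify_african_countries
  intro fips_dict _
  unfold Spec_identify_african_countries identify_african_countries identify_african_countries_alt
  simp only [matches_iff]
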